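-- pv_equiv track=rewrite | github.com/fuchsst/wcsaga_godot_converter | data_converter/resource_generators/base_resource_generator.py | _get_asset_category
-- ===== SOURCE A (Python) =====
-- def _get_asset_category(asset_name: str, asset_type: str) -> str:
--     """
--     Determine category from asset name and type.
--
--     Args:
--         asset_name: Name of the asset
--         asset_type: Type of the asset
--
--     Returns:
--         Category name
--     """
--     name_lower = asset_name.lower()
--
--     # Ship categories
--     if asset_type == "ship":
--         if any(
--             pattern in name_lower
--             for pattern in ["fighter", "interceptor", "stealth"]
--         ):
--             return "fighters"
--         elif any(pattern in name_lower for pattern in ["bomber", "assault"]):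
--             return "bombers"
--         elif any(pattern in name_lower for pattern in ["corvette", "gunboat"]):
--             return "corvettes"
--         elif any(pattern in name_lower for pattern in ["cruiser", "destroyer"]):
--             return "cruisers"
--         elif any(
--             pattern in name_lower
--             for pattern in ["capital", "dreadnought", "carrier"]
--         ):
--             return "capital_ships"
--         elif any(
--             pattern in name_lower for pattern in ["transport", "cargo", "freighter"]
--         ):
--             return "transports"
--         else:
--             return "fighters"  # Default
--
--     # Weapon categories
--     elif asset_type == "weapon":
--         if any(pattern in name_lower for pattern in ["laser", "beam"]):
--             return "beams"
--         elif any(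
--             pattern in name_lower for pattern in ["missile", "torpedo", "rocket"]
--         ):
--             return "missiles"
--         elif any(pattern in name_lower for pattern in ["flak", "aa", "anti-air"]):
--             return "aa_weapons"
--         else:
--             return "primary_weapons"  # Default
--
--     # Effect categories
--     elif asset_type == "effect":
--         if "explosion" in name_lower:
--             return "explosions"
--         elif "engine" in name_lower or "thruster" in name_lower:
--             return "engines"
--         elif "shield" in name_lower:
--             return "shields"
--         else:
--             return "general"
--
--     # Default category
--     return "misc"
-- ===== SOURCE B (Python) =====
-- # Two-stage reimplementation: match ALL patterns into a set of candidate
-- # categories, then resolve precedence by min over a numeric rank (no ordered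
-- # cascade / early exit).
--
-- _PATTERNS = {
--     "ship": [
--         ("fighter", "fighters"), ("interceptor", "fighters"), ("stealth", "fighters"),
--         ("bomber", "bombers"), ("assault", "bombers"),
--         ("corvette", "corvettes"), ("gunboat", "corvettes"),
--         ("cruiser", "cruisers"), ("destroyer", "cruisers"),
--         ("capital", "capital_ships"), ("dreadnought", "capital_ships"), ("carrier", "capital_ships"),
--         ("transport", "transports"), ("cargo", "transports"), ("freighter", "transports"),
--     ],
--     "weapon": [
--         ("laser", "beams"), ("beam", "beams"),
--         ("missile", "missiles"), ("torpedo", "missiles"), ("rocket", "missiles"),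
--         ("flak", "aa_weapons"), ("aa", "aa_weapons"), ("anti-air", "aa_weapons"),
--     ],
--     "effect": [
--         ("explosion", "explosions"),
--         ("engine", "engines"), ("thruster", "engines"),
--         ("shield", "shields"),
--     ],
-- }
--
-- _RANK = {
--     "fighters": 0, "bombers": 1, "corvettes": 2, "cruisers": 3,
--     "capital_ships": 4, "transports": 5,
--     "beams": 0, "missiles": 1, "aa_weapons": 2,
--     "explosions": 0, "engines": 1, "shields": 2,
-- }
--
-- _DEFAULT = {"ship": "fighters", "weapon": "primary_weapons", "effect": "general"}
--
--
-- def _get_asset_category(asset_name: str, asset_type: str) -> str: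
--     patterns = _PATTERNS.get(asset_type)
--     if patterns is None:
--         return "misc"
--     name_lower = asset_name.lower()
--     matched = {cat for pat, cat in patterns if pat in name_lower}
--     if matched:
--         return min(matched, key=_RANK.__getitem__)
--     return _DEFAULT[asset_type]
-- ===== Notes on version B (the rewrite author's own statement) =====
-- stated objective: alternative
-- what changed: Replaced the ordered if/elif first-match cascade by a two-stage algorithm: one pass collects the SET of all categories whose pattern occurs in the lowercased name, then min over a numeric priority rank picks the winner (per-type default if the set is empty).
import Mathlib
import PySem

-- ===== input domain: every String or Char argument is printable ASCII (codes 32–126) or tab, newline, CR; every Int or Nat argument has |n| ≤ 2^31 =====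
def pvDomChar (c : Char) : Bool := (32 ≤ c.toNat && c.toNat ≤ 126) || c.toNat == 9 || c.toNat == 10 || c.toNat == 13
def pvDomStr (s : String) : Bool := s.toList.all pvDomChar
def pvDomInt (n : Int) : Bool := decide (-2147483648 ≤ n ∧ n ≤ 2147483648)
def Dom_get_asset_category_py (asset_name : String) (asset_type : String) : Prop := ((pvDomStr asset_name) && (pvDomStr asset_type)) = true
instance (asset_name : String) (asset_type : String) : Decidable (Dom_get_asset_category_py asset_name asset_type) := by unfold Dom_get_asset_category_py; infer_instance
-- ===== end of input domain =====

-- B replaces A's ordered if/elif cascade by a two-stage algorithm: collect the set of all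
-- pattern-matched categories, then pick the minimum by a numeric priority rank (alternative; same behaviour).


-- ===== PORT A =====
def get_asset_category_py (asset_name : String) (asset_type : String) : String :=
  let name_lower := PySem.Str.lower asset_name
  if asset_type == "ship" then
    if (["fighter", "interceptor", "stealth"] : List String).any (fun pattern => PySem.Str.isIn pattern name_lower) then "fighters"
    else if (["bomber", "assault"] : List String).any (fun pattern => PySem.Str.isIn pattern name_lower) then "bombers"
    else if (["corvette", "gunboat"] : List String).any (fun pattern => PySem.Str.isIn pattern name_lower) then "corvettes"
    else if (["cruiser", "destroyer"] : List String).any (fun pattern => PySem.Str.isIn pattern name_lower) then "cruisers"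
    else if (["capital", "dreadnought", "carrier"] : List String).any (fun pattern => PySem.Str.isIn pattern name_lower) then "capital_ships"
    else if (["transport", "cargo", "freighter"] : List String).any (fun pattern => PySem.Str.isIn pattern name_lower) then "transports"
    else "fighters"
  else if asset_type == "weapon" then
    if (["laser", "beam"] : List String).any (fun pattern => PySem.Str.isIn pattern name_lower) then "beams"
    else if (["missile", "torpedo", "rocket"] : List String).any (fun pattern => PySem.Str.isIn pattern name_lower) then "missiles"
    else if (["flak", "aa", "anti-air"] : List String).any (fun pattern => PySem.Str.isIn pattern name_lower) then "aa_weapons"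
    else "primary_weapons"
  else if asset_type == "effect" then
    if PySem.Str.isIn "explosion" name_lower then "explosions"
    else if PySem.Str.isIn "engine" name_lower || PySem.Str.isIn "thruster" name_lower then "engines"
    else if PySem.Str.isIn "shield" name_lower then "shields"
    else "general"
  else "misc"

-- ===== PORT B =====
-- _PATTERNS: asset_type -> flat list of (pattern, category)
def pvPatterns : PySem.Dict String (List (String × String)) :=
  PySem.Dict.ofList
    [ ("ship",
        [ ("fighter", "fighters"), ("interceptor", "fighters"), ("stealth", "fighters"),
          ("bomber", "bombers"), ("assault", "bombers"),
          ("corvette", "corvettes"), ("gunboat", "corvettes"),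
          ("cruiser", "cruisers"), ("destroyer", "cruisers"),
          ("capital", "capital_ships"), ("dreadnought", "capital_ships"), ("carrier", "capital_ships"),
          ("transport", "transports"), ("cargo", "transports"), ("freighter", "transports") ]),
      ("weapon",
        [ ("laser", "beams"), ("beam", "beams"),
          ("missile", "missiles"), ("torpedo", "missiles"), ("rocket", "missiles"),
          ("flak", "aa_weapons"), ("aa", "aa_weapons"), ("anti-air", "aa_weapons") ]),
      ("effect",
        [ ("explosion", "explosions"),
          ("engine", "engines"), ("thruster", "engines"),
          ("shield", "shields") ]) ]

-- _RANK: category -> priority number (lookup total: every category B produces is a key)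
def pvRank : PySem.Dict String Int :=
  PySem.Dict.ofList
    [ ("fighters", 0), ("bombers", 1), ("corvettes", 2), ("cruisers", 3),
      ("capital_ships", 4), ("transports", 5),
      ("beams", 0), ("missiles", 1), ("aa_weapons", 2),
      ("explosions", 0), ("engines", 1), ("shields", 2) ]

-- _DEFAULT: asset_type -> default category (lookup total on the keys of pvPatterns)
def pvDefault : PySem.Dict String String :=
  PySem.Dict.ofList [ ("ship", "fighters"), ("weapon", "primary_weapons"), ("effect", "general") ]

def get_asset_category_py_alt (asset_name : String) (asset_type : String) : String :=
  match pvPatterns.get? asset_type with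
  | none => "misc"
  | some patterns =>
    let name_lower := PySem.Str.lower asset_name
    let matched : PySem.Set String :=
      PySem.Set.ofList ((patterns.filter (fun pc => PySem.Str.isIn pc.1 name_lower)).map Prod.snd)
    match PySem.List.min? matched (fun cat => pvRank.getD cat 0) with
    | some cat => cat
    | none => pvDefault.getD asset_type "misc"

-- ===== PRECONDITION & SPEC =====
def Spec_get_asset_category_py (asset_name : String) (asset_type : String) (out : String) : Prop := out = get_asset_category_py_alt asset_name asset_type
instance (asset_name : String) (asset_type : String) (out : String) : Decidable (Spec_get_asset_category_py asset_name asset_type out) := by unfold Spec_get_asset_category_py; infer_instance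

-- ===== CLAIM =====
def Claim_equal_get_asset_category_py : Prop := ∀ (asset_name : String) (asset_type : String), Dom_get_asset_category_py asset_name asset_type → Spec_get_asset_category_py asset_name asset_type (get_asset_category_py asset_name asset_type)

-- ===== LEMMAS AND PROOFS =====

-- the ship case as a finite Boolean function: cascade = set-then-min-rank (checked by decide)
set_option maxHeartbeats 4000000 in
theorem pv_ship_bool (b1 b2 b3 b4 b5 b6 b7 b8 b9 b10 b11 b12 b13 b14 b15 : Bool) :
    (if b1 || (b2 || b3) then "fighters"
     else if b4 || b5 then "bombers"
     else if b6 || b7 then "corvettes"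
     else if b8 || b9 then "cruisers"
     else if b10 || (b11 || b12) then "capital_ships"
     else if b13 || (b14 || b15) then "transports"
     else "fighters") =
    (match PySem.List.min?
        (PySem.Set.ofList ((([ ("fighter", "fighters"), ("interceptor", "fighters"), ("stealth", "fighters"),
          ("bomber", "bombers"), ("assault", "bombers"),
          ("corvette", "corvettes"), ("gunboat", "corvettes"),
          ("cruiser", "cruisers"), ("destroyer", "cruisers"),
          ("capital", "capital_ships"), ("dreadnought", "capital_ships"), ("carrier", "capital_ships"),
          ("transport", "transports"), ("cargo", "transports"), ("freighter", "transports") ] : List (String × String)).zip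
            [b1,b2,b3,b4,b5,b6,b7,b8,b9,b10,b11,b12,b13,b14,b15]
          |>.filter (fun pb => pb.2) |>.map (fun pb => pb.1.2))))
        (fun cat => pvRank.getD cat 0) with
     | some cat => cat
     | none => "fighters") := by
  revert b1 b2 b3 b4 b5 b6 b7 b8 b9 b10 b11 b12 b13 b14 b15
  decide

theorem pv_weapon_bool (b1 b2 b3 b4 b5 b6 b7 b8 : Bool) :
    (if b1 || b2 then "beams"
     else if b3 || (b4 || b5) then "missiles"
     else if b6 || (b7 || b8) then "aa_weapons"
     else "primary_weapons") =
    (match PySem.List.min?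
        (PySem.Set.ofList ((([ ("laser", "beams"), ("beam", "beams"),
          ("missile", "missiles"), ("torpedo", "missiles"), ("rocket", "missiles"),
          ("flak", "aa_weapons"), ("aa", "aa_weapons"), ("anti-air", "aa_weapons") ] : List (String × String)).zip
            [b1,b2,b3,b4,b5,b6,b7,b8]
          |>.filter (fun pb => pb.2) |>.map (fun pb => pb.1.2))))
        (fun cat => pvRank.getD cat 0) with
     | some cat => cat
     | none => "primary_weapons") := by
  revert b1 b2 b3 b4 b5 b6 b7 b8
  decide

theorem pv_effect_bool (b1 b2 b3 b4 : Bool) :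
    (if b1 then "explosions"
     else if b2 || b3 then "engines"
     else if b4 then "shields"
     else "general") =
    (match PySem.List.min?
        (PySem.Set.ofList ((([ ("explosion", "explosions"),
          ("engine", "engines"), ("thruster", "engines"),
          ("shield", "shields") ] : List (String × String)).zip [b1,b2,b3,b4]
          |>.filter (fun pb => pb.2) |>.map (fun pb => pb.1.2))))
        (fun cat => pvRank.getD cat 0) with
     | some cat => cat
     | none => "general") := by
  revert b1 b2 b3 b4
  decide

-- filter by isIn on a literal pattern list = zip with the isIn booleans then filter (pushes the
-- string tests into Bool variables so the boolean lemmas above apply)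
theorem pv_filter_zip (nl : String) (pats : List (String × String)) :
    (pats.filter (fun pc => PySem.Str.isIn pc.1 nl)).map Prod.snd =
    ((pats.zip (pats.map (fun pc => PySem.Str.isIn pc.1 nl))).filter (fun pb => pb.2)).map
      (fun pb => pb.1.2) := by
  induction pats with
  | nil => rfl
  | cons h t ih =>
      simp only [List.map_cons, List.zip_cons_cons, List.filter_cons]
      cases hb : PySem.Str.isIn h.1 nl <;>
        simp only [ih, Bool.false_eq_true, if_false, if_true, List.map_cons]

-- ===== VERDICT =====
set_option maxHeartbeats 2000000 in
theorem get_asset_category_py_spec : Claim_equal_get_asset_category_py := by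
  intro asset_name asset_type _
  unfold Spec_get_asset_category_py get_asset_category_py get_asset_category_py_alt
  by_cases h1 : asset_type = "ship"
  · subst h1
    rw [show pvPatterns.get? "ship" = some
      [ ("fighter", "fighters"), ("interceptor", "fighters"), ("stealth", "fighters"),
        ("bomber", "bombers"), ("assault", "bombers"),
        ("corvette", "corvettes"), ("gunboat", "corvettes"),
        ("cruiser", "cruisers"), ("destroyer", "cruisers"),
        ("capital", "capital_ships"), ("dreadnought", "capital_ships"), ("carrier", "capital_ships"),
        ("transport", "transports"), ("cargo", "transports"), ("freighter", "transports") ] from rfl]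
    simp only [beq_self_eq_true, if_true, List.any_cons, List.any_nil, Bool.or_false]
    rw [pv_filter_zip]
    simp only [List.map_cons, List.map_nil]
    exact pv_ship_bool _ _ _ _ _ _ _ _ _ _ _ _ _ _ _
  · by_cases h2 : asset_type = "weapon"
    · subst h2
      rw [show pvPatterns.get? "weapon" = some
        [ ("laser", "beams"), ("beam", "beams"),
          ("missile", "missiles"), ("torpedo", "missiles"), ("rocket", "missiles"),
          ("flak", "aa_weapons"), ("aa", "aa_weapons"), ("anti-air", "aa_weapons") ] from rfl]
      simp only [show (("weapon" : String) == "ship") = false from rfl, Bool.false_eq_true,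
        if_false, beq_self_eq_true, if_true, List.any_cons, List.any_nil, Bool.or_false]
      rw [pv_filter_zip]
      simp only [List.map_cons, List.map_nil]
      exact pv_weapon_bool _ _ _ _ _ _ _ _
    · by_cases h3 : asset_type = "effect"
      · subst h3
        rw [show pvPatterns.get? "effect" = some
          [ ("explosion", "explosions"),
            ("engine", "engines"), ("thruster", "engines"),
            ("shield", "shields") ] from rfl]
        simp only [show (("effect" : String) == "ship") = false from rfl,
          show (("effect" : String) == "weapon") = false from rfl, Bool.false_eq_true,
          if_false, beq_self_eq_true, if_true, List.any_cons, List.any_nil, Bool.or_false]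
        rw [pv_filter_zip]
        simp only [List.map_cons, List.map_nil]
        exact pv_effect_bool _ _ _ _
      · have hget : pvPatterns.get? asset_type = none := by
          have e1 : ("ship" == asset_type) = false := by
            simp only [beq_eq_false_iff_ne, ne_eq]
            exact fun h => h1 h.symm
          have e2 : ("weapon" == asset_type) = false := by
            simp only [beq_eq_false_iff_ne, ne_eq]
            exact fun h => h2 h.symm
          have e3 : ("effect" == asset_type) = false := by
            simp only [beq_eq_false_iff_ne, ne_eq]
            exact fun h => h3 h.symm
          rw [show pvPatterns = PySem.Dict.mk
            [ ("ship",
                [ ("fighter", "fighters"), ("interceptor", "fighters"), ("stealth", "fighters"),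
                  ("bomber", "bombers"), ("assault", "bombers"),
                  ("corvette", "corvettes"), ("gunboat", "corvettes"),
                  ("cruiser", "cruisers"), ("destroyer", "cruisers"),
                  ("capital", "capital_ships"), ("dreadnought", "capital_ships"), ("carrier", "capital_ships"),
                  ("transport", "transports"), ("cargo", "transports"), ("freighter", "transports") ]),
              ("weapon",
                [ ("laser", "beams"), ("beam", "beams"),
                  ("missile", "missiles"), ("torpedo", "missiles"), ("rocket", "missiles"),
                  ("flak", "aa_weapons"), ("aa", "aa_weapons"), ("anti-air", "aa_weapons") ]),
              ("effect",
                [ ("explosion", "explosions"),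
                  ("engine", "engines"), ("thruster", "engines"),
                  ("shield", "shields") ]) ] from rfl]
          simp only [PySem.Dict.get?_mk_cons, e1, e2, e3, Bool.false_eq_true, if_false]
          rfl
        rw [hget]
        have b1 : (asset_type == "ship") = false := by simp [h1]
        have b2 : (asset_type == "weapon") = false := by simp [h2]
        have b3 : (asset_type == "effect") = false := by simp [h3]
        simp only [b1, b2, b3, Bool.false_eq_true, if_false]
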